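-- pv_equiv track=rewrite | github.com/ZhemingX/leetcode-python | src/dp/ba-shu-zi-fan-yi-cheng-zi-fu-chuan-lcof.py | translateNum
-- ===== SOURCE A (Python) =====
-- def translateNum(num: int) -> int:
--     num_list = list(str(num))
--     num_list.append('0')
--     num_list.reverse() # [0 8 5 2 2 1]
--     len_list = len(num_list)
--     res = (len_list)*[0]
--     res[0], res[1] = 1, 1
--     for i in range(2, len_list):
--         if num_list[i] != '0' and int(num_list[i]+num_list[i-1]) <= 25:
--             res[i] = res[i-1] + res[i-2]
--         else:
--             res[i] = res[i-1]
--     return res[len_list-1]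
-- ===== SOURCE B (Python) =====
-- def translateNum(num: int) -> int:
--     s = str(num)
--     n = len(s)
--
--     def f(i):
--         if i >= n:
--             return 1
--         r = f(i + 1)
--         if i + 1 < n and s[i] != '0' and int(s[i:i + 2]) <= 25:
--             r += f(i + 2)
--         return r
--
--     return f(0)
-- ===== Notes on version B (the rewrite author's own statement) =====
-- stated objective: alternative
-- what changed: Replaces the bottom-up DP over a reversed, sentinel-padded digit array with a direct top-down recursion f(i) over str(num) read left to right, with no auxiliary array, no reversal and no sentinel.
import Mathlib
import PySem

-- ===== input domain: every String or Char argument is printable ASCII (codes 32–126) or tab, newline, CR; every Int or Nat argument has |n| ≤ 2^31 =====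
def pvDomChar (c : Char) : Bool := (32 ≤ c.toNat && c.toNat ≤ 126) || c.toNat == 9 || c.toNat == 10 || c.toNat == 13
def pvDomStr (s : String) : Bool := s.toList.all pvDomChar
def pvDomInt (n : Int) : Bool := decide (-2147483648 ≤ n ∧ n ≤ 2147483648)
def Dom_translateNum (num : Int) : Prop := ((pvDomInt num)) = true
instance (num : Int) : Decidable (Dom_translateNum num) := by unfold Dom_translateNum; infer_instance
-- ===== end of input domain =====

-- B replaces A's bottom-up DP over a reversed, '0'-padded digit array with a direct
-- top-down recursion over str(num) read left to right (no array, no reversal, no sentinel).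

-- ===== PORT A =====
-- loop body of A's 'for i in range(2, len_list)'; res[i] / num_list[i] indices are always
-- in range here, so pyGetD/pySetD are exact; int(...) is ported as ofChars?.getD 0, exact
-- because the two-char string is always a valid int literal (digit-digit or '-'-digit).
def aStep (numList : List Char) (res : List Int) (i : Int) : List Int :=
  if PySem.List.pyGetD numList i ' ' ≠ '0' ∧
     (PySem.Int.ofChars? [PySem.List.pyGetD numList i ' ',
                          PySem.List.pyGetD numList (i - 1) ' ']).getD 0 ≤ 25 then
    PySem.List.pySetD res i (PySem.List.pyGetD res (i - 1) 0 + PySem.List.pyGetD res (i - 2) 0)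
  else
    PySem.List.pySetD res i (PySem.List.pyGetD res (i - 1) 0)

def translateNum (num : Int) : Int :=
  let numList := ((PySem.Int.toChars num) ++ ['0']).reverse   -- list(str(num)); append('0'); reverse()
  let lenList : Int := PySem.List.len numList
  let res0 := PySem.List.pySetD (PySem.List.pySetD (List.replicate numList.length (0 : Int)) 0 1) 1 1
  let res := (PySem.List.pyRange 2 lenList 1).foldl (aStep numList) res0
  PySem.List.pyGetD res (lenList - 1) 0

-- ===== PORT B =====
-- f(i) of Source B; s[i] is in range in the taken branch, int(s[i:i+2]) ported as ofChars?.getD 0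
-- (exact: always a valid two-char int literal there).
def bGo (s : List Char) (i : Nat) : Int :=
  if h : s.length ≤ i then 1
  else
    let r := bGo s (i + 1)
    if i + 1 < s.length ∧ s[i]'(by omega) ≠ '0' ∧
       (PySem.Int.ofChars? (PySem.List.slice s (some (i : Int)) (some ((i : Int) + 2)))).getD 0 ≤ 25 then
      r + bGo s (i + 2)
    else r
termination_by s.length - i

def translateNum_alt (num : Int) : Int :=
  bGo (PySem.Int.toChars num) 0

-- ===== PRECONDITION & SPEC =====
def Spec_translateNum (num : Int) (out : Int) : Prop := out = translateNum_alt num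
instance (num : Int) (out : Int) : Decidable (Spec_translateNum num out) := by unfold Spec_translateNum; infer_instance

-- ===== CLAIM (what is proved, stated in full; the proofs are below) =====
def Claim_equal_translateNum : Prop := ∀ (num : Int), Dom_translateNum num → Spec_translateNum num (translateNum num)

-- ===== LEMMAS AND PROOFS =====

-- A's initial res array, as a function of s = list(str(num))
def res0Of (s : List Char) : List Int :=
  PySem.List.pySetD (PySem.List.pySetD (List.replicate (s.length + 1) (0 : Int)) 0 1) 1 1

lemma res0Of_getD (s : List Char) (k : Nat) (hk : k < s.length + 1) :
    PySem.List.pyGetD (res0Of s) (k : Int) 0 = if k ≤ 1 then 1 else 0 := by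
  have hset : res0Of s = ((List.replicate (s.length + 1) (0 : Int)).set 0 1).set 1 1 := by
    simp [res0Of, PySem.List.pySetD_of_nonneg]
  rw [hset, PySem.List.pyGetD_natCast]
  simp [List.getD_eq_getElem?_getD, List.getElem?_set, List.getElem?_replicate]
  split_ifs <;> simp_all <;> omega

lemma bGo_base (s : List Char) : bGo s s.length = 1 := by
  rw [bGo]; simp

lemma bGo_last (s : List Char) (hs : 1 ≤ s.length) : bGo s (s.length - 1) = 1 := by
  rw [bGo]
  have h1 : ¬ s.length ≤ s.length - 1 := by omega
  have h2 : ¬ (s.length - 1 + 1 < s.length) := by omega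
  simp only [h1, dite_false, h2, false_and, if_false]
  have : s.length - 1 + 1 = s.length := by omega
  rw [this, bGo_base]

-- the reversed padded array, read at index k+1, is s read at index n-1-k
lemma l_getD (s : List Char) (k : Nat) (hk : k < s.length) :
    (('0' :: s.reverse).getD (k + 1) ' ') = s[s.length - 1 - k]'(by omega) := by
  have h : k < s.reverse.length := by simpa using hk
  simp [List.getD, List.getElem?_cons_succ, List.getElem?_eq_getElem h, List.getElem_reverse]

-- s[j:j+2] = [s[j], s[j+1]] when j+1 < len s
lemma slice_two (s : List Char) (j : Nat) (hj : j + 1 < s.length) :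
    PySem.List.slice s (some (j : Int)) (some ((j : Int) + 2)) =
      [s[j]'(by omega), s[j + 1]'(by omega)] := by
  have h2 : ((j : Int) + 2) = ((j : Int) + ((2 : Nat) : Int)) := by norm_cast
  rw [h2, PySem.List.slice_natCast_add]
  apply List.ext_getElem
  · simp; omega
  · intro k hk1 hk2
    simp only [List.getElem_take, List.getElem_drop]
    have hk : k < 2 := by simp at hk2; omega
    interval_cases k <;> simp

-- main invariant: after A's loop has run up to m, every filled cell k holds bGo s (n - k)
lemma loop_inv (s : List Char) (hs : 1 ≤ s.length) :
    ∀ m, 2 ≤ m → m ≤ s.length + 1 →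
      (((PySem.List.pyRange 2 (m : Int) 1).foldl (aStep ('0' :: s.reverse)) (res0Of s)).length
          = s.length + 1) ∧
      ∀ k, k < m →
        PySem.List.pyGetD
          ((PySem.List.pyRange 2 (m : Int) 1).foldl (aStep ('0' :: s.reverse)) (res0Of s))
          (k : Int) 0 = bGo s (s.length - k) := by
  intro m
  induction m with
  | zero => omega
  | succ m ih =>
    intro h2 hm
    by_cases hm2 : m < 2
    · -- m + 1 = 2 : empty range, initial array
      have hm1 : m = 1 := by omega
      subst hm1
      have hc : ((1 + 1 : Nat) : Int) = (2 : Int) := by norm_num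
      simp only [hc]
      rw [PySem.List.pyRange_one_eq_nil (le_refl 2)]
      simp only [List.foldl_nil]
      constructor
      · simp [res0Of, PySem.List.pySetD_of_nonneg, List.length_set]
      · intro k hk
        interval_cases k
        · have h1 : bGo s (s.length - 0) = 1 := by simpa using bGo_base s
          rw [h1, res0Of_getD s 0 (by omega)]
          simp
        · rw [bGo_last s hs, res0Of_getD s 1 (by omega)]
          simp
    · -- step: range splits off its last element m
      have hrange : PySem.List.pyRange 2 ((m + 1 : Nat) : Int) 1
          = PySem.List.pyRange 2 ((m : Nat) : Int) 1 ++ [(m : Int)] := by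
        have : ((m + 1 : Nat) : Int) = ((m : Nat) : Int) + 1 := by push_cast; ring
        rw [this, PySem.List.pyRange_one_succ_right (by omega)]
      obtain ⟨ihlen, ihval⟩ := ih (by omega) (by omega)
      set R := (PySem.List.pyRange 2 ((m : Nat) : Int) 1).foldl (aStep ('0' :: s.reverse)) (res0Of s) with hR
      rw [hrange, List.foldl_append]
      simp only [List.foldl_cons, List.foldl_nil]
      -- the two reads at m-1 and m-2
      have hmm1 : ((m : Int) - 1) = (((m - 1 : Nat)) : Int) := by omega
      have hmm2 : ((m : Int) - 2) = (((m - 2 : Nat)) : Int) := by omega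
      have hv1 : PySem.List.pyGetD R ((m : Int) - 1) 0 = bGo s (s.length - (m - 1)) := by
        rw [hmm1]; exact ihval (m - 1) (by omega)
      have hv2 : PySem.List.pyGetD R ((m : Int) - 2) 0 = bGo s (s.length - (m - 2)) := by
        rw [hmm2]; exact ihval (m - 2) (by omega)
      -- the written value equals bGo s (n - m)
      have hwrite : aStep ('0' :: s.reverse) R (m : Int) = R.set m (bGo s (s.length - m)) := by
        have hj : s.length - m + 1 < s.length := by omega
        have hidx : s.length - 1 - (m - 2) = s.length - m + 1 := by omega
        have hidx' : s.length - 1 - (m - 1) = s.length - m := by omega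
        have hc2 : ((m : Int)) = (((m - 2 : Nat) + 1 + 1 : Nat) : Int) := by omega
        have hchar : PySem.List.pyGetD ('0' :: s.reverse) (m : Int) ' '
            = s[s.length - m]'(by omega) := by
          rw [hc2, PySem.List.pyGetD_natCast]
          have := l_getD s (m - 2 + 1) (by omega)
          simpa [hidx', show s.length - 1 - (m - 2 + 1) = s.length - m by omega] using this
        have hchar' : PySem.List.pyGetD ('0' :: s.reverse) ((m : Int) - 1) ' '
            = s[s.length - m + 1]'(by omega) := by
          rw [hmm1, PySem.List.pyGetD_natCast]
          have := l_getD s (m - 2) (by omega)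
          simpa [hidx, show (m - 2 + 1) = m - 1 by omega] using this
        -- unfold bGo at index n - m
        rw [bGo]
        have hnm : ¬ s.length ≤ s.length - m := by omega
        simp only [hnm, dite_false]
        rw [slice_two s (s.length - m) hj]
        unfold aStep
        rw [hchar, hchar', hv1, hv2]
        by_cases hcond : s[s.length - m]'(by omega) ≠ '0' ∧
            (PySem.Int.ofChars? [s[s.length - m]'(by omega), s[s.length - m + 1]'(by omega)]).getD 0 ≤ 25
        · rw [if_pos hcond, if_pos ⟨hj, hcond.1, by
            simpa [show ((s.length - m : Nat) : Int) + 2 = ((s.length - m + 2 : Nat) : Int) by omega] using hcond.2⟩]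
          rw [PySem.List.pySetD_natCast]
          congr 1
          rw [show s.length - m + 1 = s.length - (m - 1) by omega,
              show s.length - m + 2 = s.length - (m - 2) by omega]
        · rw [if_neg hcond, if_neg (by
            intro ⟨_, hne, hle⟩
            exact hcond ⟨hne, by
              simpa [show ((s.length - m : Nat) : Int) + 2 = ((s.length - m + 2 : Nat) : Int) by omega] using hle⟩)]
          rw [PySem.List.pySetD_natCast]
          congr 1
          rw [show s.length - m + 1 = s.length - (m - 1) by omega]
      rw [hwrite]
      refine ⟨by simpa using ihlen, ?_⟩
      intro k hk
      rw [PySem.List.pyGetD_natCast]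
      by_cases hkm : k = m
      · subst hkm
        rw [List.getD, List.getElem?_set_self (by omega), Option.getD_some]
      · rw [List.getD, List.getElem?_set_ne (by omega), ← List.getD]
        have := ihval k (by omega)
        rwa [PySem.List.pyGetD_natCast] at this

-- ===== VERDICT (by name: the statement is the Claim_ definition above) =====
theorem translateNum_spec : Claim_equal_translateNum := by
  intro num _
  unfold Spec_translateNum translateNum translateNum_alt
  set s := PySem.Int.toChars num with hsdef
  by_cases hs : s.length = 0
  · -- empty digit string (never reached for real ints; both sides give 1)
    have he : s = [] := List.eq_nil_of_length_eq_zero hs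
    rw [he]
    simp [PySem.List.pyRange_one_eq_nil, PySem.List.pySetD, PySem.List.pySet?,
          PySem.List.pyIdx?, PySem.List.pyGetD, PySem.List.pyGet?, bGo,
          PySem.List.len]
  · have hs1 : 1 ≤ s.length := by omega
    have hrev : ((s ++ ['0']).reverse) = '0' :: s.reverse := by simp
    have hlen : ((s ++ ['0']).reverse).length = s.length + 1 := by simp
    simp only [hrev]
    have hlen2 : PySem.List.len ('0' :: s.reverse) = ((s.length + 1 : Nat) : Int) := by
      simp [PySem.List.len_eq]
    rw [hlen2]
    have hres0 : List.replicate ('0' :: s.reverse).length (0 : Int) = List.replicate (s.length + 1) 0 := by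
      simp
    rw [hres0]
    obtain ⟨_, hval⟩ := loop_inv s hs1 (s.length + 1) (by omega) (by omega)
    have hidx : ((s.length + 1 : Nat) : Int) - 1 = ((s.length : Nat) : Int) := by omega
    rw [hidx]
    have := hval s.length (by omega)
    simpa [res0Of] using this
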